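-- pv_equiv track=rewrite | github.com/LeVion16/python_test | test_b.py | digit_diff
-- ===== SOURCE A (Python) =====
-- def digit_diff(n: int) -> int:
--
--     if n < 0: return -1
--
--     if len(str(n)) < 2: return -1
--
--     n = str(n)
--     """
--     Ez egy generátor kifejezés (int(ch) for ch in n), amit a max() függvény feldolgoz.
--     Mit csinál pontosan:
--         A for ch in n végigmegy az n karakterein: '2', '8', '5', '6'
--         Az int(ch) minden karaktert számmá alakít: 2, 8, 5, 6
--         A max() megkeresi ezek közül a legnagyobbat → 8
--         Ez az érték kerül a max_n változóba.
--     👉 Tehát a max_n itt 8 lesz.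
--     """
--     max_n = max(int(ch) for ch in n)
--     min_n = min(int(ch) for ch in n)
--
--     return max_n - min_n
-- ===== SOURCE B (Python) =====
-- def digit_diff(n: int) -> int:
--     if n < 0: return -1
--     if len(str(n)) < 2: return -1
--     digits = sorted(str(n))
--     return int(digits[-1]) - int(digits[0])
-- ===== Notes on version B (the rewrite author's own statement) =====
-- stated objective: simpler
-- what changed: Replaces the two separate max/min scans over per-character int conversions by a single sort of the digit string, reading the extremes from the sorted list's end positions.
import Mathlib
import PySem

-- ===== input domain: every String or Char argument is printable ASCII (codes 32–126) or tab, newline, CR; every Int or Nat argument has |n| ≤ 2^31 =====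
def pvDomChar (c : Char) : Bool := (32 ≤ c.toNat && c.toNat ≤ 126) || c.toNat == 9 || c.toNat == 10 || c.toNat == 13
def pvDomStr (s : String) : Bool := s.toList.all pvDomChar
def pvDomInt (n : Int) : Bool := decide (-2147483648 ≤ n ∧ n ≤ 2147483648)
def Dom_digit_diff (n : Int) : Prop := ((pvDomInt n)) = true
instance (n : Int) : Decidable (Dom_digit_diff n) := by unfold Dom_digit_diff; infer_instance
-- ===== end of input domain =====

-- B replaces A's two max/min scans by one sort of the digit string, reading the extremes at its ends (objective: simpler).

-- int(ch) for a one-character string ch (used verbatim by both Pythons)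
def chVal (c : Char) : Int := (PySem.Int.ofChars? [c]).getD 0

-- ===== PORT A =====
def digit_diff (n : Int) : Int :=
  if n < 0 then -1
  else if PySem.Str.len (PySem.Int.toStr n) < 2 then -1
  else
    let s := (PySem.Int.toStr n).toList
    let max_n := (PySem.List.max? (s.map chVal) (fun x => x)).getD 0
    let min_n := (PySem.List.min? (s.map chVal) (fun x => x)).getD 0
    max_n - min_n

-- ===== PORT B =====
def digit_diff_alt (n : Int) : Int :=
  if n < 0 then -1
  else if PySem.Str.len (PySem.Int.toStr n) < 2 then -1
  else
    let digits := PySem.List.sorted (PySem.Int.toStr n).toList (fun c => c) false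
    chVal ((PySem.List.pyGet? digits (-1)).getD '0') - chVal ((PySem.List.pyGet? digits 0).getD '0')

-- ===== PRECONDITION & SPEC =====
def Spec_digit_diff (n : Int) (out : Int) : Prop := out = digit_diff_alt n
instance (n : Int) (out : Int) : Decidable (Spec_digit_diff n out) := by unfold Spec_digit_diff; infer_instance

-- ===== CLAIM (what is proved, stated in full; the proofs are below) =====
def Claim_equal_digit_diff : Prop := ∀ (n : Int), Dom_digit_diff n → Spec_digit_diff n (digit_diff n)

-- ===== LEMMAS AND PROOFS =====

def isDig (c : Char) : Prop := 48 ≤ c.toNat ∧ c.toNat ≤ 57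

theorem digitChar_digit (m : Nat) (h : m < 10) : isDig (Nat.digitChar m) := by
  interval_cases m <;> exact ⟨by decide, by decide⟩

theorem toDigitsCore_digits (fuel : Nat) : ∀ (n : Nat) (ds : List Char),
    (∀ c ∈ ds, isDig c) → ∀ c ∈ Nat.toDigitsCore 10 fuel n ds, isDig c := by
  induction fuel with
  | zero => intro n ds h c hc; exact h c hc
  | succ k ih =>
    intro n ds h c hc
    simp only [Nat.toDigitsCore] at hc
    have hd : ∀ x ∈ (n % 10).digitChar :: ds, isDig x := by
      intro x hx
      rcases List.mem_cons.mp hx with rfl | hx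
      · exact digitChar_digit _ (Nat.mod_lt _ (by norm_num))
      · exact h x hx
    split at hc
    · exact hd c hc
    · exact ih _ _ hd c hc

theorem toChars_digits (n : Int) (hn : 0 ≤ n) : ∀ c ∈ PySem.Int.toChars n, isDig c := by
  simp only [PySem.Int.toChars, if_neg (not_lt.mpr hn)]
  exact toDigitsCore_digits _ _ _ (by simp)

theorem chVal_ofNat (m : Nat) (h1 : 48 ≤ m) (h2 : m ≤ 57) :
    chVal (Char.ofNat m) = (m : Int) - 48 := by
  interval_cases m <;> decide

theorem chVal_eq (c : Char) (h : isDig c) : chVal c = (c.toNat : Int) - 48 := by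
  have := chVal_ofNat c.toNat h.1 h.2
  rwa [Char.ofNat_toNat] at this

theorem chVal_mono (a b : Char) (ha : isDig a) (hb : isDig b) (h : a ≤ b) :
    chVal a ≤ chVal b := by
  rw [chVal_eq a ha, chVal_eq b hb]
  have h' : a.toNat ≤ b.toNat := Char.le_def.mp h
  omega

theorem pyGet_zero {α : Type} (xs : List α) (h : xs ≠ []) :
    PySem.List.pyGet? xs 0 = some (xs.head h) := by
  simp only [PySem.List.pyGet?, PySem.List.pyIdx?]
  cases xs with
  | nil => exact absurd rfl h
  | cons a t => simp

theorem pyGet_neg_one {α : Type} (xs : List α) (h : xs ≠ []) :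
    PySem.List.pyGet? xs (-1) = some (xs.getLast h) := by
  have hlen : 1 ≤ xs.length := List.length_pos_of_ne_nil h
  simp only [PySem.List.pyGet?, PySem.List.pyIdx?]
  simp only [List.getLast_eq_getElem]
  have hlt : xs.length - 1 < xs.length := by omega
  simp [hlen, List.getElem?_eq_getElem hlt]

theorem max_side (cs : List Char) (hne : cs ≠ []) (hd : ∀ c ∈ cs, isDig c)
    (hs : PySem.List.sorted cs (fun c => c) false ≠ []) :
    (PySem.List.max? (cs.map chVal) (fun x => x)).getD 0
      = chVal ((PySem.List.sorted cs (fun c => c) false).getLast hs) := by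
  obtain ⟨m, hm⟩ : ∃ m, PySem.List.max? (cs.map chVal) (fun x => x) = some m := by
    cases hmx : PySem.List.max? (cs.map chVal) (fun x => x) with
    | none => exact absurd ((PySem.List.max?_eq_none_iff _ _).mp hmx) (by simp [hne])
    | some m => exact ⟨m, rfl⟩
  rw [hm]; simp only [Option.getD_some]
  have hperm := PySem.List.sorted_perm cs (fun c : Char => c) false
  have hlast_mem : (PySem.List.sorted cs (fun c => c) false).getLast hs ∈ cs :=
    hperm.mem_iff.mp (List.getLast_mem hs)
  have h1 : chVal ((PySem.List.sorted cs (fun c => c) false).getLast hs) ≤ m :=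
    PySem.List.max?_isMax hm _ (List.mem_map_of_mem hlast_mem)
  have h2 : m ≤ chVal ((PySem.List.sorted cs (fun c => c) false).getLast hs) := by
    obtain ⟨c, hc, rfl⟩ := List.mem_map.mp (PySem.List.max?_mem hm)
    have hcs : c ∈ PySem.List.sorted cs (fun c => c) false := hperm.mem_iff.mpr hc
    obtain ⟨i, hi, hci⟩ := List.mem_iff_getElem.mp hcs
    have hlen : (PySem.List.sorted cs (fun c => c) false).length = cs.length :=
      PySem.List.length_sorted cs _ false
    have hmono := PySem.List.sorted_id_getElem_mono cs
      (p := i) (q := (PySem.List.sorted cs (fun c => c) false).length - 1)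
      (by omega) (by omega)
    rw [List.getLast_eq_getElem]
    have hmem2 : (PySem.List.sorted cs (fun c => c) false)[(PySem.List.sorted cs (fun c => c) false).length - 1] ∈ cs := by
      rw [← List.getLast_eq_getElem]; exact hlast_mem
    refine chVal_mono _ _ (hd c hc) (hd _ hmem2) ?_
    rw [← hci]
    exact hmono
  exact le_antisymm h2 h1

theorem min_side (cs : List Char) (hne : cs ≠ []) (hd : ∀ c ∈ cs, isDig c)
    (hs : PySem.List.sorted cs (fun c => c) false ≠ []) :
    (PySem.List.min? (cs.map chVal) (fun x => x)).getD 0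
      = chVal ((PySem.List.sorted cs (fun c => c) false).head hs) := by
  obtain ⟨m, hm⟩ : ∃ m, PySem.List.min? (cs.map chVal) (fun x => x) = some m := by
    cases hmx : PySem.List.min? (cs.map chVal) (fun x => x) with
    | none => exact absurd ((PySem.List.min?_eq_none_iff _ _).mp hmx) (by simp [hne])
    | some m => exact ⟨m, rfl⟩
  rw [hm]; simp only [Option.getD_some]
  have hperm := PySem.List.sorted_perm cs (fun c : Char => c) false
  have hhead_mem : (PySem.List.sorted cs (fun c => c) false).head hs ∈ cs :=
    hperm.mem_iff.mp (List.head_mem hs)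
  have h1 : m ≤ chVal ((PySem.List.sorted cs (fun c => c) false).head hs) :=
    PySem.List.min?_isMin hm _ (List.mem_map_of_mem hhead_mem)
  have h2 : chVal ((PySem.List.sorted cs (fun c => c) false).head hs) ≤ m := by
    obtain ⟨c, hc, rfl⟩ := List.mem_map.mp (PySem.List.min?_mem hm)
    obtain ⟨h0, t, hcons⟩ : ∃ h0 t, PySem.List.sorted cs (fun c => c) false = h0 :: t := by
      cases hx : PySem.List.sorted cs (fun c => c) false with
      | nil => exact absurd hx hs
      | cons a t => exact ⟨a, t, rfl⟩
    have hle := PySem.List.key_head_sorted_le cs (fun c => c) hcons c hc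
    have hheq : (PySem.List.sorted cs (fun c => c) false).head hs = h0 := by
      simp [hcons]
    rw [hheq]
    exact chVal_mono _ _ (hd _ (hheq ▸ hhead_mem)) (hd c hc) hle
  exact le_antisymm h1 h2

-- ===== VERDICT =====
theorem digit_diff_spec : Claim_equal_digit_diff := by
  intro n _
  unfold Spec_digit_diff digit_diff digit_diff_alt
  by_cases hn : n < 0
  · simp only [if_pos hn]
  · simp only [if_neg hn]
    by_cases hlen : PySem.Str.len (PySem.Int.toStr n) < 2
    · simp only [if_pos hlen]
    · simp only [if_neg hlen]
      have hd : ∀ c ∈ (PySem.Int.toStr n).toList, isDig c := by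
        rw [PySem.Int.toList_toStr]; exact toChars_digits n (not_lt.mp hn)
      have hlen' : 2 ≤ (PySem.Int.toStr n).toList.length := by
        rw [PySem.Str.len_eq] at hlen; omega
      have hne : (PySem.Int.toStr n).toList ≠ [] := by
        intro h; rw [h] at hlen'; simp at hlen'
      have hs : PySem.List.sorted (PySem.Int.toStr n).toList (fun c => c) false ≠ [] := by
        rw [Ne, PySem.List.sorted_eq_nil_iff]; exact hne
      simp only [pyGet_zero _ hs, pyGet_neg_one _ hs, Option.getD_some]
      rw [max_side _ hne hd hs, min_side _ hne hd hs]
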